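-- pv_equiv track=rewrite | github.com/johnhlocke/AD-Epstein-Index | src/bulk_crossref.py | _bb_match_type
-- ===== SOURCE A (Python) =====
-- def _bb_match_type(bb_matches):
--     """Extract best match type from BB matches."""
--     if not bb_matches:
--         return None
--     rank = {"last_first": 4, "full_name": 3, "last_name_only": 2}
--     best = None
--     best_rank = 0
--     for m in bb_matches:
--         mt = m.get("match_type", "")
--         r = rank.get(mt, 0)
--         if r > best_rank:
--             best_rank = r
--             best = mt
--     return best
-- ===== SOURCE B (Python) =====
-- def _bb_match_type(bb_matches):
--     """Extract best match type from BB matches."""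
--     present = {m.get("match_type", "") for m in bb_matches}
--     for mt in ("last_first", "full_name", "last_name_only"):
--         if mt in present:
--             return mt
--     return None
-- ===== Notes on version B (the rewrite author's own statement) =====
-- stated objective: idiomatic
-- what changed: Replaces the running-max scan with a running rank by a set of present match_type strings plus a walk over the fixed priority list, returning the first one present.
import Mathlib
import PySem

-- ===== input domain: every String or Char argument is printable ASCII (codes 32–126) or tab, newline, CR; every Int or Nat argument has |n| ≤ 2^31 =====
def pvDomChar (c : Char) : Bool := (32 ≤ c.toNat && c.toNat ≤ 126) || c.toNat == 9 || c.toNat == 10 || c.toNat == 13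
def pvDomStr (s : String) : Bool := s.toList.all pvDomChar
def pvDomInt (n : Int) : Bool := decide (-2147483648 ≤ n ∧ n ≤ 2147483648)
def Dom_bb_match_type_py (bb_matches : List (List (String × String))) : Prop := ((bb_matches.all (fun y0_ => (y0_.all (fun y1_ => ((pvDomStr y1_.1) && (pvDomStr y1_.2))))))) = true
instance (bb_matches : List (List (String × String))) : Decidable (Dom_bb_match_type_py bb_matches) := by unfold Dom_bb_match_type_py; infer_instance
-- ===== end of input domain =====

-- B replaces A's running-max rank scan with a set of the match_type strings present plus a walk down the fixed priority list (idiomatic; same O(n) cost).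


-- ===== PORT A =====
-- A's literal rank dict and its loop body (m.get("match_type","") / rank.get(mt, 0) / running max)
def pvRankDict : PySem.Dict String Int :=
  PySem.Dict.mk [("last_first", 4), ("full_name", 3), ("last_name_only", 2)]

def pvStepA (st : Option String × Int) (m : List (String × String)) : Option String × Int :=
  let mt := PySem.Dict.getD (PySem.Dict.mk m) "match_type" ""
  let r := PySem.Dict.getD pvRankDict mt 0
  if r > st.2 then (some mt, r) else st

def bb_match_type_py (bb_matches : List (List (String × String))) : Option String :=
  if bb_matches = [] then none
  else (bb_matches.foldl pvStepA (none, 0)).1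

-- ===== PORT B =====
-- B: set of the match_type strings present, then first hit walking the fixed priority tuple
def bb_match_type_py_alt (bb_matches : List (List (String × String))) : Option String :=
  let present : PySem.Set String :=
    PySem.Set.ofList (bb_matches.map (fun m => PySem.Dict.getD (PySem.Dict.mk m) "match_type" ""))
  ["last_first", "full_name", "last_name_only"].find? (fun mt => PySem.Set.contains present mt)

-- ===== PRECONDITION & SPEC =====
def Spec_bb_match_type_py (bb_matches : List (List (String × String))) (out : Option String) : Prop := out = bb_match_type_py_alt bb_matches
instance (bb_matches : List (List (String × String))) (out : Option String) : Decidable (Spec_bb_match_type_py bb_matches out) := by unfold Spec_bb_match_type_py; infer_instance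

-- ===== CLAIM (what is proved, stated in full; the proofs are below) =====
def Claim_equal_bb_match_type_py : Prop := ∀ (bb_matches : List (List (String × String))), Dom_bb_match_type_py bb_matches → Spec_bb_match_type_py bb_matches (bb_match_type_py bb_matches)

-- ===== LEMMAS AND PROOFS =====

def pvMtOf (m : List (String × String)) : String := PySem.Dict.getD (PySem.Dict.mk m) "match_type" ""

lemma pvRank_eq (t : String) :
    PySem.Dict.getD pvRankDict t 0 =
      if t = "last_first" then 4
      else if t = "full_name" then 3
      else if t = "last_name_only" then 2 else 0 := by
  by_cases h1 : t = "last_first"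
  · subst h1; rfl
  by_cases h2 : t = "full_name"
  · subst h2; rfl
  by_cases h3 : t = "last_name_only"
  · subst h3; rfl
  rw [if_neg h1, if_neg h2, if_neg h3]
  simp only [pvRankDict, PySem.Dict.getD_eq_get?_getD, PySem.Dict.get?_mk_cons, beq_iff_eq,
    if_neg (Ne.symm h1), if_neg (Ne.symm h2), if_neg (Ne.symm h3)]
  rfl

set_option maxHeartbeats 1000000 in
-- characterisation of A's loop: the result depends only on which ranked strings occur
lemma pvLoopA_eq (ms : List (List (String × String))) (b : Option String) (r : Int) (hr0 : 0 ≤ r) :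
    ms.foldl pvStepA (b, r) =
      if r < 4 ∧ "last_first" ∈ ms.map pvMtOf then (some "last_first", 4)
      else if r < 3 ∧ "full_name" ∈ ms.map pvMtOf then (some "full_name", 3)
      else if r < 2 ∧ "last_name_only" ∈ ms.map pvMtOf then (some "last_name_only", 2)
      else (b, r) := by
  induction ms generalizing b r with
  | nil => simp
  | cons m ms ih =>
    have hstep : pvStepA (b, r) m =
        if PySem.Dict.getD pvRankDict (pvMtOf m) 0 > r
        then (some (pvMtOf m), PySem.Dict.getD pvRankDict (pvMtOf m) 0) else (b, r) := rfl
    simp only [List.foldl_cons, hstep, pvRank_eq, List.map_cons, List.mem_cons]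
    by_cases h1 : pvMtOf m = "last_first"
    · rw [if_pos h1, h1]
      by_cases hrc : (4:Int) > r
      · rw [if_pos hrc, ih _ _ (by omega)]
        rw [if_neg (by omega : ¬((4:Int) < 4 ∧ "last_first" ∈ ms.map pvMtOf)),
            if_neg (by omega : ¬((4:Int) < 3 ∧ "full_name" ∈ ms.map pvMtOf)),
            if_neg (by omega : ¬((4:Int) < 2 ∧ "last_name_only" ∈ ms.map pvMtOf)),
            if_pos ⟨by omega, Or.inl rfl⟩]
      · rw [if_neg hrc, ih _ _ hr0]
        split_ifs <;> first | rfl | (exfalso; omega)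
    · rw [if_neg h1]
      have hE1 : ¬("last_first" = pvMtOf m) := fun h => h1 h.symm
      by_cases h2 : pvMtOf m = "full_name"
      · rw [if_pos h2, h2]
        have hE1' : ¬(("last_first" : String) = "full_name") := by decide
        by_cases hrc : (3:Int) > r
        · rw [if_pos hrc, ih _ _ (by omega)]
          by_cases hm1 : "last_first" ∈ ms.map pvMtOf
          · rw [if_pos (show (3:Int) < 4 ∧ "last_first" ∈ ms.map pvMtOf from ⟨by omega, hm1⟩),
                if_pos (show r < 4 ∧ ("last_first" = "full_name" ∨ "last_first" ∈ ms.map pvMtOf)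
                  from ⟨by omega, Or.inr hm1⟩)]
          · rw [if_neg (show ¬((3:Int) < 4 ∧ "last_first" ∈ ms.map pvMtOf) from fun h => hm1 h.2),
                if_neg (by omega : ¬((3:Int) < 3 ∧ "full_name" ∈ ms.map pvMtOf)),
                if_neg (by omega : ¬((3:Int) < 2 ∧ "last_name_only" ∈ ms.map pvMtOf)),
                if_neg (show ¬(r < 4 ∧ ("last_first" = "full_name" ∨ "last_first" ∈ ms.map pvMtOf))
                  from fun h => hm1 (h.2.resolve_left hE1')),
                if_pos (show r < 3 ∧ ("full_name" = "full_name" ∨ "full_name" ∈ ms.map pvMtOf)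
                  from ⟨by omega, Or.inl rfl⟩)]
        · rw [if_neg hrc, ih _ _ hr0]
          split_ifs <;> first | rfl | (exfalso; omega) | (exfalso; tauto)
      · rw [if_neg h2]
        have hE2 : ¬("full_name" = pvMtOf m) := fun h => h2 h.symm
        by_cases h3 : pvMtOf m = "last_name_only"
        · rw [if_pos h3, h3]
          have hE1' : ¬(("last_first" : String) = "last_name_only") := by decide
          have hE2' : ¬(("full_name" : String) = "last_name_only") := by decide
          by_cases hrc : (2:Int) > r
          · rw [if_pos hrc, ih _ _ (by omega)]
            by_cases hm1 : "last_first" ∈ ms.map pvMtOf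
            · rw [if_pos (show (2:Int) < 4 ∧ "last_first" ∈ ms.map pvMtOf from ⟨by omega, hm1⟩),
                  if_pos (show r < 4 ∧ ("last_first" = "last_name_only" ∨ "last_first" ∈ ms.map pvMtOf)
                    from ⟨by omega, Or.inr hm1⟩)]
            · rw [if_neg (show ¬((2:Int) < 4 ∧ "last_first" ∈ ms.map pvMtOf) from fun h => hm1 h.2),
                  if_neg (show ¬(r < 4 ∧ ("last_first" = "last_name_only" ∨ "last_first" ∈ ms.map pvMtOf))
                    from fun h => hm1 (h.2.resolve_left hE1'))]
              by_cases hm2 : "full_name" ∈ ms.map pvMtOf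
              · rw [if_pos (show (2:Int) < 3 ∧ "full_name" ∈ ms.map pvMtOf from ⟨by omega, hm2⟩),
                    if_pos (show r < 3 ∧ ("full_name" = "last_name_only" ∨ "full_name" ∈ ms.map pvMtOf)
                      from ⟨by omega, Or.inr hm2⟩)]
              · rw [if_neg (show ¬((2:Int) < 3 ∧ "full_name" ∈ ms.map pvMtOf) from fun h => hm2 h.2),
                    if_neg (show ¬(r < 3 ∧ ("full_name" = "last_name_only" ∨ "full_name" ∈ ms.map pvMtOf))
                      from fun h => hm2 (h.2.resolve_left hE2')),
                    if_neg (by omega : ¬((2:Int) < 2 ∧ "last_name_only" ∈ ms.map pvMtOf)),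
                    if_pos (show r < 2 ∧ ("last_name_only" = "last_name_only" ∨ "last_name_only" ∈ ms.map pvMtOf)
                      from ⟨by omega, Or.inl rfl⟩)]
          · rw [if_neg hrc, ih _ _ hr0]
            split_ifs <;> first | rfl | (exfalso; omega) | (exfalso; tauto)
        · rw [if_neg h3]
          have hE3 : ¬("last_name_only" = pvMtOf m) := fun h => h3 h.symm
          rw [if_neg (not_lt.mpr hr0), ih _ _ hr0]
          split_ifs <;> first | rfl | (exfalso; omega) | (exfalso; tauto)

-- ===== VERDICT (by name: the statement is the Claim_ definition above) =====
theorem bb_match_type_py_spec : Claim_equal_bb_match_type_py := by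
  intro bb _
  show bb_match_type_py bb = bb_match_type_py_alt bb
  unfold bb_match_type_py bb_match_type_py_alt
  by_cases hnil : bb = []
  · subst hnil; rfl
  · rw [if_neg hnil, pvLoopA_eq _ _ _ le_rfl]
    by_cases hm1 : "last_first" ∈ bb.map pvMtOf <;>
      by_cases hm2 : "full_name" ∈ bb.map pvMtOf <;>
        by_cases hm3 : "last_name_only" ∈ bb.map pvMtOf <;>
          simp only [List.mem_map, pvMtOf] at hm1 hm2 hm3 <;>
            simp [List.find?, PySem.Set.contains, List.mem_map, pvMtOf, hm1, hm2, hm3]
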